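-- pv_equiv track=rewrite | github.com/TUCircle/grammar | type_1.py | findVariablePos
-- ===== SOURCE A (Python) =====
-- def findVariablePos(s,direction=1):
-- 	if direction == 1:
-- 		A = range(len(s))
-- 	else:
-- 		A = range(len(s)-1,-1,-1)
-- 	for i in A:
-- 		if s[i].isupper():
-- 			return i
-- 	return None
-- ===== SOURCE B (Python) =====
-- def findVariablePos(s, direction=1):
--     first = None
--     last = None
--     for i, ch in enumerate(s):
--         if ch.isupper():
--             if first is None:
--                 first = i
--             last = i
--     return first if direction == 1 else last
-- ===== Notes on version B (the rewrite author's own statement) =====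
-- stated objective: alternative
-- what changed: Replaces the direction-dependent index range with early return by one uniform forward enumerate pass that tracks both the first and last uppercase position and selects the answer at the end.
import Mathlib
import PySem

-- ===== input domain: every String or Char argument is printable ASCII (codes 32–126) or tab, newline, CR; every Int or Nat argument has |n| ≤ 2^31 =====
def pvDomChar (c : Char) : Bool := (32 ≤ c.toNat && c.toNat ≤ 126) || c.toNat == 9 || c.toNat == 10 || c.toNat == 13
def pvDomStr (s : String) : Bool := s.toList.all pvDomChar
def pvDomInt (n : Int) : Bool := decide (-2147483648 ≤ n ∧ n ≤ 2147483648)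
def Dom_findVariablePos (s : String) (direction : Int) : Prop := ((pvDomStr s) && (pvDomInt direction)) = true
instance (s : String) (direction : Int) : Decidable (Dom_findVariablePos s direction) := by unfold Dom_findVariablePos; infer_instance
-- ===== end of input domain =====

-- B differs from A by one uniform forward pass tracking first and last uppercase positions
-- instead of a direction-dependent index range with early return (return values proven equal).

-- ===== PORT A =====
-- the 'for i in A: if s[i].isupper(): return i' loop of A; the 'none' on pyGet? = none
-- mirrors Python's IndexError (never reached: indices come from range(len(s)))
def pvLoopA (cs : List Char) : List Int → Option Int
  | [] => none
  | i :: rest =>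
    match PySem.List.pyGet? cs i with
    | none => none
    | some c => if PySem.Chars.isupper c then some i else pvLoopA cs rest

def findVariablePos (s : String) (direction : Int) : Option Int :=
  if direction = 1 then
    pvLoopA s.toList (PySem.List.pyRange 0 (PySem.Str.len s) 1)
  else
    pvLoopA s.toList (PySem.List.pyRange (PySem.Str.len s - 1) (-1) (-1))

-- ===== PORT B =====
-- the loop body of Source B: on an uppercase char set first only if still None, always update last
def pvStepB (acc : Option Int × Option Int) (ic : Int × Char) : Option Int × Option Int :=
  if PySem.Chars.isupper ic.2 then
    ((match acc.1 with | none => some ic.1 | some f => some f), some ic.1)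
  else acc

def findVariablePos_alt (s : String) (direction : Int) : Option Int :=
  let p := (PySem.List.enumerate s.toList 0).foldl pvStepB (none, none)
  if direction = 1 then p.1 else p.2

-- ===== PRECONDITION & SPEC =====
def Spec_findVariablePos (s : String) (direction : Int) (out : Option Int) : Prop := out = findVariablePos_alt s direction
instance (s : String) (direction : Int) (out : Option Int) : Decidable (Spec_findVariablePos s direction out) := by unfold Spec_findVariablePos; infer_instance

-- ===== CLAIM (what is proved, stated in full; the proofs are below) =====
def Claim_equal_findVariablePos : Prop := ∀ (s : String) (direction : Int), Dom_findVariablePos s direction → Spec_findVariablePos s direction (findVariablePos s direction)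

-- ===== LEMMAS AND PROOFS =====

-- position of the first uppercase char of cs, indices starting at k
def pvFirstUp : List Char → Int → Option Int
  | [], _ => none
  | c :: rest, k => if PySem.Chars.isupper c then some k else pvFirstUp rest (k + 1)

-- position of the last uppercase char of cs, indices starting at k
def pvLastUp : List Char → Int → Option Int
  | [], _ => none
  | c :: rest, k =>
    match pvLastUp rest (k + 1) with
    | some x => some x
    | none => if PySem.Chars.isupper c then some k else none

theorem pvFoldB_spec (cs : List Char) (k : Int) (f l : Option Int) :
    (PySem.List.enumerate cs k).foldl pvStepB (f, l) =
      ((match f with | some x => some x | none => pvFirstUp cs k),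
       (match pvLastUp cs k with | some x => some x | none => l)) := by
  induction cs generalizing k f l with
  | nil => cases f <;> simp [PySem.List.enumerate_nil, pvFirstUp, pvLastUp]
  | cons c rest ih =>
    rw [PySem.List.enumerate_cons]
    simp only [List.foldl_cons, pvStepB, pvFirstUp, pvLastUp]
    by_cases hu : PySem.Chars.isupper c
    · simp only [hu, if_pos]
      rw [ih]
      cases f <;> cases pvLastUp rest (k + 1) <;> simp
    · simp only [hu, Bool.false_eq_true, if_false]
      rw [ih]
      cases pvLastUp rest (k + 1) <;> simp

theorem pvLoopA_congr (cs cs' : List Char) (L : List Int)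
    (h : ∀ i ∈ L, PySem.List.pyGet? cs i = PySem.List.pyGet? cs' i) :
    pvLoopA cs L = pvLoopA cs' L := by
  induction L with
  | nil => rfl
  | cons i rest ih =>
    simp only [pvLoopA]
    rw [h i (List.mem_cons_self ..)]
    cases PySem.List.pyGet? cs' i with
    | none => rfl
    | some c =>
      by_cases hu : PySem.Chars.isupper c <;>
        simp [hu, ih (fun j hj => h j (List.mem_cons_of_mem _ hj))]

theorem pvLoopA_fwd (cs pre : List Char) :
    pvLoopA (pre ++ cs) (PySem.List.pyRange (pre.length : Int) ((pre.length : Int) + cs.length) 1)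
      = pvFirstUp cs (pre.length : Int) := by
  induction cs generalizing pre with
  | nil =>
    rw [PySem.List.pyRange_one_eq_nil (by simp)]
    rfl
  | cons c rest ih =>
    rw [PySem.List.pyRange_one_cons (by push_cast [List.length_cons]; omega)]
    simp only [pvLoopA, PySem.List.pyGet?_append_length, pvFirstUp]
    by_cases hu : PySem.Chars.isupper c
    · simp [hu]
    · simp only [hu, Bool.false_eq_true, if_false]
      have h := ih (pre ++ [c])
      simp only [List.append_assoc, List.singleton_append, List.length_append,
        List.length_singleton] at h
      push_cast [List.length_cons] at h ⊢
      rw [show (pre.length : Int) + (rest.length + 1) = pre.length + 1 + rest.length by ring]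
      exact h

theorem pvLastUp_append (ds : List Char) (c : Char) (k : Int) :
    pvLastUp (ds ++ [c]) k =
      if PySem.Chars.isupper c then some (k + ds.length) else pvLastUp ds k := by
  induction ds generalizing k with
  | nil => by_cases hu : PySem.Chars.isupper c <;> simp [pvLastUp, hu]
  | cons d ds' ih =>
    simp only [List.cons_append, pvLastUp, ih]
    by_cases hu : PySem.Chars.isupper c
    · simp only [hu, if_pos, Option.some.injEq]
      push_cast [List.length_cons]
      ring
    · simp [hu]

theorem pvLoopA_bwd (cs : List Char) :
    pvLoopA cs (PySem.List.pyRange ((cs.length : Int) - 1) (-1) (-1)) = pvLastUp cs 0 := by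
  induction cs using List.reverseRecOn with
  | nil =>
    rw [PySem.List.pyRange_neg_one_eq_nil (by simp)]
    rfl
  | append_singleton ds c ih =>
    have hlen : ((ds ++ [c]).length : Int) - 1 = (ds.length : Int) := by
      push_cast [List.length_append, List.length_singleton]; ring
    rw [hlen, PySem.List.pyRange_neg_one_cons (by omega)]
    simp only [pvLoopA, PySem.List.pyGet?_append_length, pvLastUp_append]
    by_cases hu : PySem.Chars.isupper c
    · simp [hu]
    · simp only [hu, Bool.false_eq_true, if_false]
      rw [pvLoopA_congr (ds ++ [c]) ds _ ?_]
      · exact ih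
      · intro i hi
        rw [PySem.List.mem_pyRange_neg_one] at hi
        have h0 : 0 ≤ i := by omega
        have h1 : i.toNat < ds.length := by omega
        rw [PySem.List.pyGet?_of_nonneg _ h0, PySem.List.pyGet?_of_nonneg _ h0,
          List.getElem?_append_left h1]

-- ===== VERDICT (by name: the statement is the Claim_ definition above) =====
theorem findVariablePos_spec : Claim_equal_findVariablePos := by
  intro s direction _
  unfold Spec_findVariablePos findVariablePos findVariablePos_alt
  rw [pvFoldB_spec]
  by_cases hd : direction = 1
  · simp only [hd, if_pos, PySem.Str.len_eq]
    have h := pvLoopA_fwd s.toList []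
    simpa using h
  · simp only [hd, if_false]
    have h := pvLoopA_bwd s.toList
    simp only [PySem.Str.len_eq]
    rw [h]
    cases pvLastUp s.toList 0 <;> rfl
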